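-- pv_equiv track=rewrite | github.com/ByloTonix/dsba-ads-contests | contest_3/F. Кубики.py | petya
-- ===== SOURCE A (Python) =====
-- def petya(n, m, c):
--     c += c[:n][::-1]
--     possible = [0] * (2 * n)
--     for i in range(1, 2 * n):
--         j = possible[i - 1]
--         while j > 0 and c[i] != c[j]:
--             j = possible[j - 1]
--         if c[i] == c[j]:
--             j += 1
--         possible[i] = j
--
--     length = possible[-1]
--     while length > n:
--         length = possible[length - 1]
--
--     answer = []
--     while length > 0:
--         if length % 2 == 0:
--             answer.append(n - length // 2)
--         length = possible[length - 1]
--     answer.append(n)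
--     return sorted(answer)
-- ===== SOURCE B (Python) =====
-- def petya(n, m, c):
--     s = c + c[:n][::-1]
--     answer = []
--     for k in range((n + 1) // 2, n):
--         b = 2 * (n - k)
--         if all(s[i] == s[2 * n - b + i] for i in range(b)):
--             answer.append(k)
--     answer.append(n)
--     return answer
-- ===== Notes on version B (the rewrite author's own statement) =====
-- stated objective: simpler
-- what changed: Replaced the KMP prefix-function table, its border-chain descent and the final sort by a direct scan over candidate cut positions k, testing each candidate with one element-by-element prefix/suffix comparison and emitting results already in increasing order (no sort needed).
import Mathlib
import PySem

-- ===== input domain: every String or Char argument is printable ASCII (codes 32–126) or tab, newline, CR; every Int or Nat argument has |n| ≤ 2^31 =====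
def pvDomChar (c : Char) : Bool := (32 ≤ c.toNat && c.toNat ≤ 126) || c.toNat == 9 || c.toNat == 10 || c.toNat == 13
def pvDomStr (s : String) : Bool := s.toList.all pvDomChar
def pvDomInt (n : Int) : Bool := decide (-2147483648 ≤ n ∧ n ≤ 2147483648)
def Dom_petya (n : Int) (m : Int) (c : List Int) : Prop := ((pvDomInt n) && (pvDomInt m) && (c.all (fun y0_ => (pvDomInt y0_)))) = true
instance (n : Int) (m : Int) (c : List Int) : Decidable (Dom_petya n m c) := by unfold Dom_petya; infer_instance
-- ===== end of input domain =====

-- B replaces A's KMP prefix-function / border-chain machinery by a direct scan over the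
-- candidate cut positions k, testing each candidate symmetric block by one prefix/suffix
-- slice comparison (objective: simpler).  Note: Python A mutates its argument c in place
-- (c += ...); the equivalence proved here is about the RETURN value only.

-- ===== PORT A =====
-- while j > 0 and c[i] != c[j]: j = possible[j-1]   (fuel j0+1 always suffices: j strictly decreases)
def pvKmpDescend (cc : List Int) (pos : List Nat) (ci : Int) : Nat → Nat → Nat
  | 0, j => j
  | fuel+1, j => if 0 < j ∧ ci ≠ cc.getD j 0 then pvKmpDescend cc pos ci fuel (pos.getD (j-1) 0) else j

-- the for-loop body: one KMP prefix-function step at index i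
def pvKmpStep (cc : List Int) (pos : List Nat) (i : Nat) : List Nat :=
  let j0 := pos.getD (i-1) 0
  let ci := cc.getD i 0
  let j1 := pvKmpDescend cc pos ci (j0+1) j0
  let j2 := if ci = cc.getD j1 0 then j1 + 1 else j1
  pos.set i j2

-- possible = [0]*(2n); for i in range(1, 2n): ...
def pvKmpTable (cc : List Int) (n2 : Nat) : List Nat :=
  (List.range' 1 (n2 - 1)).foldl (pvKmpStep cc) (List.replicate n2 0)

-- while length > n: length = possible[length-1]
def pvShrink (pos : List Nat) (n : Int) : Nat → Nat → Nat
  | 0, l => l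
  | fuel+1, l => if n < (l : Int) then pvShrink pos n fuel (pos.getD (l-1) 0) else l

-- while length > 0: if length % 2 == 0: answer.append(n - length//2); length = possible[length-1]
def pvCollect (pos : List Nat) (n : Int) : Nat → Nat → List Int
  | 0, _ => []
  | fuel+1, l =>
      if 0 < l then
        (if l % 2 = 0 then [n - ((l / 2 : Nat) : Int)] else []) ++ pvCollect pos n fuel (pos.getD (l-1) 0)
      else []

def petya (n : Int) (m : Int) (c : List Int) : List Int :=
  let cc := c ++ (PySem.List.slice c none (some n)).reverse
  let n2 := (2 * n).toNat
  let pos := pvKmpTable cc n2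
  let l0 := pos.getD (n2 - 1) 0
  let l1 := pvShrink pos n (l0 + 1) l0
  let answer := pvCollect pos n (l1 + 1) l1 ++ [n]
  PySem.List.sorted answer (fun x => x) false

-- ===== PORT B =====
def petya_alt (n : Int) (m : Int) (c : List Int) : List Int :=
  let s := c ++ (PySem.List.slice c none (some n)).reverse
  let ks := PySem.List.pyRange (PySem.Int.floordiv (n + 1) 2) n 1
  (ks.foldl (fun acc k =>
      let b := 2 * (n - k)
      if (PySem.List.pyRange 0 b 1).all
          (fun i => PySem.List.pyGetD s i 0 == PySem.List.pyGetD s (2*n - b + i) 0) = true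
      then acc ++ [k] else acc) []) ++ [n]

-- ===== PRECONDITION & SPEC =====
-- Pre_: exactly the inputs where Python A returns (otherwise possible[-1] or c[i] raises IndexError)
def Pre_petya (n : Int) (m : Int) (c : List Int) : Prop := 1 ≤ n ∧ n ≤ (c.length : Int)
instance (n : Int) (m : Int) (c : List Int) : Decidable (Pre_petya n m c) := by unfold Pre_petya; infer_instance
def pvWitness_petya : Int × Int × List Int := (2, 0, [1, 2])

def Spec_petya (n : Int) (m : Int) (c : List Int) (out : List Int) : Prop := out = petya_alt n m c
instance (n : Int) (m : Int) (c : List Int) (out : List Int) : Decidable (Spec_petya n m c out) := by unfold Spec_petya; infer_instance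

-- ===== CLAIM (what is proved, stated in full; the proofs are below) =====
def Claim_equal_petya : Prop := ∀ (n : Int) (m : Int) (c : List Int), Dom_petya n m c → Pre_petya n m c → Spec_petya n m c (petya n m c)

-- ===== LEMMAS AND PROOFS =====


-- b is a (proper) border of the num-prefix of s
abbrev pvP (s : List Int) (num b : Nat) : Prop := b < num ∧ s.take b <:+ s.take num

-- the prefix function: longest proper border of the num-prefix
def pvPi (s : List Int) (num : Nat) : Nat := Nat.findGreatest (fun b => pvP s num b) (num - 1)

theorem pvP_zero (s : List Int) (num : Nat) (h : 0 < num) : pvP s num 0 :=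
  ⟨h, by simp⟩

theorem pvPi_lt (s : List Int) (num : Nat) (h : 0 < num) : pvPi s num < num :=
  lt_of_le_of_lt (Nat.findGreatest_le _) (by omega)

theorem pvPi_border (s : List Int) (num : Nat) (h : 0 < num) : pvP s num (pvPi s num) :=
  Nat.findGreatest_spec (Nat.zero_le _) (pvP_zero s num h)

theorem pvPi_max (s : List Int) (num b : Nat) (hb : pvP s num b) : b ≤ pvPi s num :=
  Nat.le_findGreatest (by have := hb.1; omega) hb

theorem pvPi_eq (s : List Int) (num p : Nat) (hp : pvP s num p)
    (hmax : ∀ b, pvP s num b → b ≤ p) : pvPi s num = p :=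
  le_antisymm (hmax _ (pvPi_border s num (by have := hp.1; omega))) (pvPi_max s num p hp)

theorem pvP_trans (s : List Int) {n1 n2 b : Nat} (h1 : pvP s n1 b) (h2 : pvP s n2 n1) :
    pvP s n2 b := ⟨by have := h1.1; have := h2.1; omega, h1.2.trans h2.2⟩

theorem pvP_nest (s : List Int) {num b b' : Nat} (hb : pvP s num b) (hb' : pvP s num b')
    (hlt : b < b') : pvP s b' b := by
  refine ⟨hlt, List.suffix_of_suffix_length_le hb.2 hb'.2 ?_⟩
  have := hb.1; have := hb'.1
  simp only [List.length_take]
  omega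

theorem pvSuffix_concat_iff (x y : List Int) (a c : Int) :
    x ++ [a] <:+ y ++ [c] ↔ a = c ∧ x <:+ y := by
  constructor
  · intro h
    have h' : (x ++ [a]).reverse <+: (y ++ [c]).reverse := by
      exact (List.reverse_prefix (l₁ := x ++ [a]) (l₂ := y ++ [c])).mpr h
    simp only [List.reverse_append, List.reverse_cons, List.reverse_nil, List.nil_append,
      List.singleton_append, List.cons_prefix_cons] at h'
    exact ⟨h'.1, (List.reverse_prefix).mp h'.2⟩
  · rintro ⟨rfl, h⟩
    have h' : (x ++ [a]).reverse <+: (y ++ [a]).reverse := by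
      simp only [List.reverse_append, List.reverse_cons, List.reverse_nil, List.nil_append,
        List.singleton_append, List.cons_prefix_cons]
      exact ⟨by trivial, (List.reverse_prefix).mpr h⟩
    exact (List.reverse_prefix (l₁ := x ++ [a]) (l₂ := y ++ [a])).mp h'

theorem pvP_succ (s : List Int) (mm b : Nat) (hm : mm < s.length) (hb : b < mm) :
    (pvP s (mm+1) (b+1) ↔ (pvP s mm b ∧ s.getD b 0 = s.getD mm 0)) := by
  have hbl : b < s.length := by omega
  have htm : s.take (mm+1) = s.take mm ++ [s.getD mm 0] := by
    rw [List.take_succ]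
    congr 1
    rw [List.getElem?_eq_getElem hm]
    simp [List.getD_eq_getElem?_getD, List.getElem?_eq_getElem hm]
  have htb : s.take (b+1) = s.take b ++ [s.getD b 0] := by
    rw [List.take_succ]
    congr 1
    rw [List.getElem?_eq_getElem hbl]
    simp [List.getD_eq_getElem?_getD, List.getElem?_eq_getElem hbl]
  constructor
  · rintro ⟨-, hsuf⟩
    rw [htm, htb, pvSuffix_concat_iff] at hsuf
    exact ⟨⟨hb, hsuf.2⟩, hsuf.1⟩
  · rintro ⟨⟨-, hsuf⟩, heq⟩
    refine ⟨by omega, ?_⟩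
    rw [htm, htb, pvSuffix_concat_iff]
    exact ⟨heq, hsuf⟩


theorem pvGetD_set (l : List Nat) (i k : Nat) (v : Nat) (hi : i < l.length) :
    (l.set i v).getD k 0 = if k = i then v else l.getD k 0 := by
  simp only [List.getD_eq_getElem?_getD, List.getElem?_set]
  by_cases h : i = k
  · subst h; simp [hi]
  · rw [if_neg h, if_neg (fun hh => h hh.symm)]

theorem pvKmpDescend_spec (cc : List Int) (pos : List Nat) (s : List Int) (i : Nat)
    (hcc : ∀ k, k < s.length → cc.getD k 0 = s.getD k 0)
    (hpos : ∀ k, k < i → pos.getD k 0 = pvPi s (k+1))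
    (hi : i < s.length) :
    ∀ fuel j, j + 1 ≤ fuel → pvP s i j →
      pvP s i (pvKmpDescend cc pos (cc.getD i 0) fuel j) ∧
      (pvKmpDescend cc pos (cc.getD i 0) fuel j = 0 ∨
        s.getD i 0 = s.getD (pvKmpDescend cc pos (cc.getD i 0) fuel j) 0) ∧
      (∀ b, pvP s i b → b ≤ j → s.getD b 0 = s.getD i 0 →
        b ≤ pvKmpDescend cc pos (cc.getD i 0) fuel j) := by
  intro fuel
  induction fuel with
  | zero => intro j hf _; omega
  | succ fuel ih =>
    intro j hf hj
    have hji : j < i := hj.1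
    have hcci : cc.getD i 0 = s.getD i 0 := hcc i hi
    have hccj : cc.getD j 0 = s.getD j 0 := hcc j (by omega)
    by_cases hcond : 0 < j ∧ cc.getD i 0 ≠ cc.getD j 0
    · have hstep : pvKmpDescend cc pos (cc.getD i 0) (fuel+1) j
          = pvKmpDescend cc pos (cc.getD i 0) fuel (pos.getD (j-1) 0) := by
        simp only [pvKmpDescend, if_pos hcond]
      have hj1 : pos.getD (j-1) 0 = pvPi s j := by
        have := hpos (j-1) (by omega)
        rwa [Nat.sub_add_cancel (by omega)] at this
      have hpj : pvP s j (pvPi s j) := pvPi_border s j (by omega)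
      have hpij : pvP s i (pvPi s j) := pvP_trans s hpj hj
      have hlt : pvPi s j < j := pvPi_lt s j (by omega)
      have := ih (pos.getD (j-1) 0) (by omega) (by rw [hj1]; exact hpij)
      rw [hstep]
      refine ⟨this.1, this.2.1, ?_⟩
      intro b hb hble heq
      rcases Nat.lt_or_ge b j with hblt | hbge
      · have hbj : pvP s j b := pvP_nest s hb hj hblt
        have hble' : b ≤ pos.getD (j-1) 0 := by
          rw [hj1]; exact pvPi_max s j b hbj
        exact (ih (pos.getD (j-1) 0) (by omega) (by rw [hj1]; exact hpij)).2.2 b hb hble' heq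
      · have hbj : b = j := by omega
        subst hbj
        exfalso
        exact hcond.2 ((hcci.trans heq.symm).trans hccj.symm)
    · have hstep : pvKmpDescend cc pos (cc.getD i 0) (fuel+1) j = j := by
        simp only [pvKmpDescend, if_neg hcond]
      rw [hstep]
      refine ⟨hj, ?_, fun b _ hble _ => hble⟩
      rcases Nat.eq_zero_or_pos j with h0 | h0
      · exact Or.inl h0
      · right
        have : cc.getD i 0 = cc.getD j 0 := by
          by_contra hne
          exact hcond ⟨h0, hne⟩
        rw [← hcci, this, hccj]

theorem pvKmpStep_spec (cc : List Int) (pos : List Nat) (s : List Int) (i : Nat)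
    (hcc : ∀ k, k < s.length → cc.getD k 0 = s.getD k 0)
    (hpos : ∀ k, k < i → pos.getD k 0 = pvPi s (k+1))
    (hlen : pos.length = s.length)
    (h1 : 1 ≤ i) (hi : i < s.length) :
    (pvKmpStep cc pos i).length = s.length ∧
    ∀ k, k < i + 1 → (pvKmpStep cc pos i).getD k 0 = pvPi s (k+1) := by
  have hj0 : pos.getD (i-1) 0 = pvPi s i := by
    have := hpos (i-1) (by omega); rwa [Nat.sub_add_cancel h1] at this
  have hpj0 : pvP s i (pvPi s i) := pvPi_border s i (by omega)
  have hdes := pvKmpDescend_spec cc pos s i hcc hpos hi (pos.getD (i-1) 0 + 1)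
      (pos.getD (i-1) 0) (le_refl _) (by rw [hj0]; exact hpj0)
  set j1 := pvKmpDescend cc pos (cc.getD i 0) (pos.getD (i-1) 0 + 1) (pos.getD (i-1) 0)
    with hj1def
  obtain ⟨hPj1, hmatch, hmax⟩ := hdes
  have hj1lt : j1 < i := hPj1.1
  have hcci : cc.getD i 0 = s.getD i 0 := hcc i hi
  have hccj1 : cc.getD j1 0 = s.getD j1 0 := hcc j1 (by omega)
  have hval : (if cc.getD i 0 = cc.getD j1 0 then j1 + 1 else j1) = pvPi s (i+1) := by
    by_cases hc : cc.getD i 0 = cc.getD j1 0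
    · rw [if_pos hc]
      symm; apply pvPi_eq
      · exact (pvP_succ s i j1 hi hj1lt).mpr ⟨hPj1, by rw [← hccj1, ← hc, hcci]⟩
      · intro b hb
        rcases Nat.eq_zero_or_pos b with h0 | h0
        · omega
        · obtain ⟨b', rfl⟩ : ∃ b', b = b' + 1 := ⟨b - 1, by omega⟩
          have hbb := (pvP_succ s i b' hi (by have := hb.1; omega)).mp hb
          have hble : b' ≤ pos.getD (i-1) 0 := by rw [hj0]; exact pvPi_max s i b' hbb.1
          have := hmax b' hbb.1 hble hbb.2
          omega
    · rw [if_neg hc]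
      have hj10 : j1 = 0 := by
        rcases hmatch with h | h
        · exact h
        · exact absurd (by rw [hcci, hccj1]; exact h) hc
      rw [hj10]
      symm; apply pvPi_eq
      · exact pvP_zero s (i+1) (by omega)
      · intro b hb
        rcases Nat.eq_zero_or_pos b with h0 | h0
        · omega
        · obtain ⟨b', rfl⟩ : ∃ b', b = b' + 1 := ⟨b - 1, by omega⟩
          have hbb := (pvP_succ s i b' hi (by have := hb.1; omega)).mp hb
          have hble : b' ≤ pos.getD (i-1) 0 := by rw [hj0]; exact pvPi_max s i b' hbb.1
          have hb0 := hmax b' hbb.1 hble hbb.2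
          rw [hj10] at hb0
          have hb0' : b' = 0 := by omega
          subst hb0'
          exfalso
          apply hc
          rw [hcci, ← hbb.2, ← hcc 0 (by omega), hj10]
  have hstep : pvKmpStep cc pos i = pos.set i (if cc.getD i 0 = cc.getD j1 0 then j1 + 1 else j1) := by
    simp only [pvKmpStep, hj1def]
  rw [hstep]
  constructor
  · simp [List.length_set, hlen]
  · intro k hk
    rw [pvGetD_set pos i k _ (by omega)]
    by_cases hki : k = i
    · rw [if_pos hki, hval, hki]
    · rw [if_neg hki]
      exact hpos k (by omega)

theorem pvKmpFold_inv (cc : List Int) (s : List Int)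
    (hcc : ∀ k, k < s.length → cc.getD k 0 = s.getD k 0) :
    ∀ cnt i pos, 1 ≤ i → i + cnt ≤ s.length → pos.length = s.length →
      (∀ k, k < i → pos.getD k 0 = pvPi s (k+1)) →
      ((List.range' i cnt).foldl (pvKmpStep cc) pos).length = s.length ∧
      ∀ k, k < i + cnt → ((List.range' i cnt).foldl (pvKmpStep cc) pos).getD k 0 = pvPi s (k+1) := by
  intro cnt
  induction cnt with
  | zero =>
    intro i pos h1 h2 h3 h4
    exact ⟨by simpa using h3, fun k hk => by simpa using h4 k (by omega)⟩
  | succ cnt ih =>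
    intro i pos h1 h2 h3 h4
    rw [List.range'_succ, List.foldl_cons]
    have hstep := pvKmpStep_spec cc pos s i hcc h4 h3 h1 (by omega)
    have := ih (i+1) (pvKmpStep cc pos i) (by omega) (by omega) hstep.1 hstep.2
    exact ⟨this.1, fun k hk => this.2 k (by omega)⟩

theorem pvKmpTable_spec (cc : List Int) (n2 : Nat) (h2 : n2 ≤ cc.length) (hn2 : 1 ≤ n2) :
    (pvKmpTable cc n2).length = n2 ∧
    ∀ k, k < n2 → (pvKmpTable cc n2).getD k 0 = pvPi (cc.take n2) (k+1) := by
  have hslen : (cc.take n2).length = n2 := by simp; omega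
  have hcc : ∀ k, k < (cc.take n2).length → cc.getD k 0 = (cc.take n2).getD k 0 := by
    intro k hk
    rw [hslen] at hk
    simp [List.getD_eq_getElem?_getD, List.getElem?_take, hk]
  have hinit : ∀ k, k < 1 → (List.replicate n2 0).getD k 0 = pvPi (cc.take n2) (k+1) := by
    intro k hk
    have hk0 : k = 0 := by omega
    subst hk0
    have : pvPi (cc.take n2) 1 = 0 := by
      rw [pvPi]
      simp [Nat.findGreatest_zero]
    rw [this]
    simp [List.getD_eq_getElem?_getD, List.getElem?_replicate, Nat.lt_of_lt_of_le Nat.zero_lt_one hn2]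
  have hfold := pvKmpFold_inv cc (cc.take n2) hcc (n2-1) 1 (List.replicate n2 0)
      (le_refl _) (by omega) (by simp [hslen]) hinit
  rw [pvKmpTable]
  refine ⟨by rw [hfold.1, hslen], fun k hk => hfold.2 k (by omega)⟩

theorem pvShrink_spec (pos : List Nat) (s : List Int) (n : Int) (hn1 : 1 ≤ n)
    (hpos : ∀ k, k < s.length → pos.getD k 0 = pvPi s (k+1)) :
    ∀ fuel l, l + 1 ≤ fuel → pvP s s.length l →
      pvP s s.length (pvShrink pos n fuel l) ∧
      ((pvShrink pos n fuel l : Int) ≤ n) ∧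
      (∀ b, pvP s s.length b → (b : Int) ≤ n → b ≤ l → b ≤ pvShrink pos n fuel l) := by
  intro fuel
  induction fuel with
  | zero => intro l hf _; omega
  | succ fuel ih =>
    intro l hf hl
    by_cases hc : n < (l : Int)
    · have hl1 : 1 ≤ l := by omega
      have hll : l < s.length := hl.1
      have hgl : pos.getD (l-1) 0 = pvPi s l := by
        have := hpos (l-1) (by omega); rwa [Nat.sub_add_cancel hl1] at this
      have hpl : pvP s l (pvPi s l) := pvPi_border s l (by omega)
      have hplt : pvPi s l < l := pvPi_lt s l (by omega)
      have hstep : pvShrink pos n (fuel+1) l = pvShrink pos n fuel (pos.getD (l-1) 0) := by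
        simp only [pvShrink, if_pos hc]
      rw [hstep]
      have hih := ih (pos.getD (l-1) 0) (by omega) (by rw [hgl]; exact pvP_trans s hpl hl)
      refine ⟨hih.1, hih.2.1, ?_⟩
      intro b hb hbn hble
      have hblt : b < l := by omega
      have hble2 : b ≤ pos.getD (l-1) 0 := by
        rw [hgl]; exact pvPi_max s l b (pvP_nest s hb hl hblt)
      exact hih.2.2 b hb hbn hble2
    · have hstep : pvShrink pos n (fuel+1) l = l := by
        simp only [pvShrink, if_neg hc]
      rw [hstep]
      exact ⟨hl, by omega, fun b _ _ hble => hble⟩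

theorem pvCollect_spec (pos : List Nat) (s : List Int) (n : Int)
    (hpos : ∀ k, k < s.length → pos.getD k 0 = pvPi s (k+1)) :
    ∀ fuel l, l + 1 ≤ fuel → (l = 0 ∨ pvP s s.length l) →
      (∀ x, x ∈ pvCollect pos n fuel l ↔
        ∃ b : Nat, pvP s s.length b ∧ 0 < b ∧ b ≤ l ∧ b % 2 = 0 ∧ x = n - ((b/2 : Nat) : Int)) ∧
      (pvCollect pos n fuel l).Pairwise (· < ·) := by
  intro fuel
  induction fuel with
  | zero => intro l hf _; omega
  | succ fuel ih =>
    intro l hf hl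
    rcases Nat.eq_zero_or_pos l with h0 | h0
    · subst h0
      constructor
      · intro x
        simp only [pvCollect, if_neg (lt_irrefl 0)]
        simp only [List.not_mem_nil, false_iff]
        rintro ⟨b, -, hb1, hb2, -⟩
        omega
      · simp only [pvCollect, if_neg (lt_irrefl 0)]
        exact List.Pairwise.nil
    · have hpl : pvP s s.length l := hl.resolve_left (by omega)
      have hll : l < s.length := hpl.1
      have hgl : pos.getD (l-1) 0 = pvPi s l := by
        have := hpos (l-1) (by omega); rwa [Nat.sub_add_cancel h0] at this
      have hpil : pvP s l (pvPi s l) := pvPi_border s l h0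
      have hplt : pvPi s l < l := pvPi_lt s l h0
      have hstep : pvCollect pos n (fuel+1) l =
          (if l % 2 = 0 then [n - ((l/2 : Nat) : Int)] else []) ++
            pvCollect pos n fuel (pos.getD (l-1) 0) := by
        simp only [pvCollect, if_pos h0]
      have hih := ih (pos.getD (l-1) 0) (by omega)
          (Or.inr (by rw [hgl]; exact pvP_trans s hpil hpl))
      -- a border b ≤ l is either l itself or a border ≤ pvPi s l
      have hsplit : ∀ b : Nat, pvP s s.length b → 0 < b →
          (b ≤ l ↔ b = l ∨ b ≤ pos.getD (l-1) 0) := by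
        intro b hb hbpos
        constructor
        · intro hble
          rcases Nat.lt_or_ge b l with hblt | hbge
          · right; rw [hgl]; exact pvPi_max s l b (pvP_nest s hb hpl hblt)
          · left; omega
        · intro h
          rcases h with h | h
          · omega
          · rw [hgl] at h; omega
      rw [hstep]
      constructor
      · intro x
        rw [List.mem_append]
        constructor
        · intro hx
          rcases hx with hx | hx
          · by_cases hev : l % 2 = 0
            · rw [if_pos hev] at hx
              simp only [List.mem_singleton] at hx
              exact ⟨l, hpl, h0, le_refl _, hev, hx⟩
            · rw [if_neg hev] at hx
              simp at hx
          · obtain ⟨b, hb, hbp, hble, hbe, hxv⟩ := (hih.1 x).mp hx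
            exact ⟨b, hb, hbp, by rw [hgl] at hble; omega, hbe, hxv⟩
        · rintro ⟨b, hb, hbp, hble, hbe, hxv⟩
          rcases ((hsplit b hb hbp).mp hble) with hbl | hbl
          · subst hbl
            left
            rw [if_pos hbe]
            simp [hxv]
          · right
            exact (hih.1 x).mpr ⟨b, hb, hbp, hbl, hbe, hxv⟩
      · rw [List.pairwise_append]
        refine ⟨?_, hih.2, ?_⟩
        · split
          · exact List.pairwise_singleton _ _
          · exact List.Pairwise.nil
        · intro a ha y hy
          by_cases hev : l % 2 = 0
          · rw [if_pos hev] at ha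
            simp only [List.mem_singleton] at ha
            obtain ⟨b, hb, hbp, hble, hbe, hyv⟩ := (hih.1 y).mp hy
            rw [hgl] at hble
            subst ha hyv
            have : b / 2 < l / 2 := by omega
            have hcast : ((b/2 : Nat) : Int) < ((l/2 : Nat) : Int) := by exact_mod_cast this
            omega
          · rw [if_neg hev] at ha
            simp at ha

theorem pvFoldl_filter (cc : List Int) (n : Int) (l acc : List Int) :
    l.foldl (fun acc k =>
        if (PySem.List.pyRange 0 (2*(n-k)) 1).all
            (fun i => PySem.List.pyGetD cc i 0 == PySem.List.pyGetD cc (2*n - (2*(n-k)) + i) 0) = true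
        then acc ++ [k] else acc) acc
      = acc ++ l.filter (fun k => (PySem.List.pyRange 0 (2*(n-k)) 1).all
            (fun i => PySem.List.pyGetD cc i 0 == PySem.List.pyGetD cc (2*n - (2*(n-k)) + i) 0)) := by
  induction l generalizing acc with
  | nil => simp
  | cons x xs ih =>
    simp only [List.foldl_cons, List.filter_cons]
    by_cases h : (PySem.List.pyRange 0 (2*(n-x)) 1).all
        (fun i => PySem.List.pyGetD cc i 0 == PySem.List.pyGetD cc (2*n - (2*(n-x)) + i) 0) = true
    · rw [if_pos h, ih, h]
      simp
    · rw [if_neg h, ih]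
      simp only [Bool.not_eq_true] at h
      rw [h]
      simp
  
theorem pvBool_eq_decide (x : Bool) (p : Prop) [Decidable p] (h : x = true ↔ p) :
    x = decide p := by
  by_cases hp : p
  · simp [hp, h.mpr hp]
  · simp only [hp, decide_false]
    by_contra hx
    simp only [Bool.not_eq_false] at hx
    exact hp (h.mp hx)

theorem pvTake_suffix_iff (s : List Int) (bb : Nat) (hbb : bb ≤ s.length) :
    (s.take bb <:+ s) ↔ ∀ i, i < bb → s[i]? = s[s.length - bb + i]? := by
  rw [List.suffix_iff_eq_drop]
  have hlt : (s.take bb).length = bb := by simp [List.length_take]; omega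
  rw [hlt]
  constructor
  · intro h i hi
    have := congrArg (fun t => t[i]?) h
    simp only [List.getElem?_take, List.getElem?_drop] at this
    rwa [if_pos hi] at this
  · intro h
    apply List.ext_getElem?
    intro i
    simp only [List.getElem?_take, List.getElem?_drop]
    by_cases hi : i < bb
    · rw [if_pos hi]
      exact h i hi
    · rw [if_neg hi]
      symm
      apply List.getElem?_eq_none
      omega

theorem pvCond_iff (cc : List Int) (N : Nat) (n b : Int)
    (hN : (N : Int) = n) (hlen : 2*N ≤ cc.length) (hb : 0 < b) (hbN : b.toNat ≤ N) :
    (((PySem.List.pyRange 0 b 1).all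
        (fun i => PySem.List.pyGetD cc i 0 == PySem.List.pyGetD cc (2*n - b + i) 0) = true)
      ↔ pvP (cc.take (2*N)) (cc.take (2*N)).length b.toNat) := by
  have hslen : (cc.take (2*N)).length = 2*N := by simp [List.length_take]; omega
  have hbc : ((b.toNat : Int)) = b := Int.toNat_of_nonneg (by omega)
  have hN1 : 1 ≤ N := by omega
  have hb2N : b.toNat < 2*N := by omega
  have htl : (cc.take (2*N)).take ((cc.take (2*N)).length) = cc.take (2*N) := List.take_length
  -- both sides reduce to pointwise equality of cc
  have hpt : ∀ i : Nat, i < 2*N → (cc.take (2*N))[i]? = cc[i]? := by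
    intro i hi
    simp [List.getElem?_take, hi]
  constructor
  · intro h
    refine ⟨by omega, ?_⟩
    rw [htl, pvTake_suffix_iff _ _ (by omega)]
    intro i hi
    have hx := List.all_eq_true.mp h ((i : Int))
        (by rw [PySem.List.mem_pyRange_one]; omega)
    simp only [beq_iff_eq] at hx
    have h1 : PySem.List.pyGetD cc ((i : Int)) 0 = cc.getD i 0 := PySem.List.pyGetD_natCast cc i 0
    have h2 : (2*n - b + (i : Int)) = (((2*N - b.toNat + i : Nat) : Int)) := by
      push_cast; omega
    rw [h1, h2, PySem.List.pyGetD_natCast] at hx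
    rw [hslen, hpt i (by omega), hpt (2*N - b.toNat + i) (by omega)]
    have hi1 : i < cc.length := by omega
    have hi2 : 2*N - b.toNat + i < cc.length := by omega
    rw [List.getElem?_eq_getElem hi1, List.getElem?_eq_getElem hi2]
    simp only [Option.some.injEq]
    simpa [List.getD_eq_getElem?_getD, List.getElem?_eq_getElem, hi1, hi2] using hx
  · rintro ⟨-, hsuf⟩
    rw [htl, pvTake_suffix_iff _ _ (by omega)] at hsuf
    rw [List.all_eq_true]
    intro x hx
    rw [PySem.List.mem_pyRange_one] at hx
    have hxN : ((x.toNat : Int)) = x := Int.toNat_of_nonneg hx.1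
    have hxb : x.toNat < b.toNat := by omega
    have h := hsuf x.toNat hxb
    rw [hslen, hpt x.toNat (by omega), hpt (2*N - b.toNat + x.toNat) (by omega)] at h
    have hi1 : x.toNat < cc.length := by omega
    have hi2 : 2*N - b.toNat + x.toNat < cc.length := by omega
    rw [List.getElem?_eq_getElem hi1, List.getElem?_eq_getElem hi2] at h
    simp only [Option.some.injEq] at h
    have e1 : PySem.List.pyGetD cc x 0 = cc.getD x.toNat 0 := by
      rw [← hxN]; exact PySem.List.pyGetD_natCast cc x.toNat 0
    have e2 : PySem.List.pyGetD cc (2*n - b + x) 0 = cc.getD (2*N - b.toNat + x.toNat) 0 := by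
      have h2 : (2*n - b + x) = (((2*N - b.toNat + x.toNat : Nat) : Int)) := by
        push_cast; omega
      rw [h2]; exact PySem.List.pyGetD_natCast cc _ 0
    rw [beq_iff_eq, e1, e2]
    simpa [List.getD_eq_getElem?_getD, List.getElem?_eq_getElem, hi1, hi2] using h

theorem pvMain (n m : Int) (c : List Int) (hn1 : 1 ≤ n) (hnc : n ≤ (c.length : Int)) :
    petya n m c = petya_alt n m c := by
  have hN0 : (0:Int) ≤ n := by omega
  have hNn : ((n.toNat : Int)) = n := Int.toNat_of_nonneg hN0
  simp only [petya, petya_alt]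
  rw [PySem.List.slice_to c hN0]
  set N := n.toNat with hNdef
  have hN1 : 1 ≤ N := by omega
  have hNc : N ≤ c.length := by omega
  have hn2' : (2*n).toNat = 2*N := by omega
  rw [hn2']
  set cc := c ++ (c.take N).reverse with hccdef
  have hcclen : cc.length = c.length + N := by
    simp [hccdef, List.length_take]
    omega
  have h2cc : 2*N ≤ cc.length := by omega
  set s := cc.take (2*N) with hsdef
  have hslen : s.length = 2*N := by
    rw [hsdef]; simp; omega
  set tab := pvKmpTable cc (2*N) with htabdef
  have htab := pvKmpTable_spec cc (2*N) h2cc (by omega)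
  rw [← htabdef, ← hsdef] at htab
  have hpos : ∀ k, k < s.length → tab.getD k 0 = pvPi s (k+1) := by
    rw [hslen]; exact htab.2
  have hl0 : tab.getD (2*N-1) 0 = pvPi s (2*N) := by
    have h := htab.2 (2*N-1) (by omega)
    have heq : 2*N - 1 + 1 = 2*N := by omega
    rwa [heq] at h
  set l0 := tab.getD (2*N-1) 0 with hl0def
  have hl0b : pvP s s.length l0 := by
    rw [hl0, hslen]
    exact pvPi_border s (2*N) (by omega)
  have hshr := pvShrink_spec tab s n hn1 hpos (l0+1) l0 (le_refl _) hl0b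
  set r := pvShrink tab n (l0+1) l0 with hrdef
  have hcol := pvCollect_spec tab s n hpos (r+1) r (le_refl _) (Or.inr hshr.1)
  -- A-side membership: exactly the even borders of s of length ≤ n
  have hmemA : ∀ x, x ∈ pvCollect tab n (r+1) r ↔
      ∃ b : Nat, pvP s s.length b ∧ 0 < b ∧ (b : Int) ≤ n ∧ b % 2 = 0 ∧
        x = n - ((b/2 : Nat) : Int) := by
    intro x
    rw [hcol.1 x]
    constructor
    · rintro ⟨b, hb, hbp, hble, hbe, hxv⟩
      refine ⟨b, hb, hbp, ?_, hbe, hxv⟩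
      have h1 : ((b : Int)) ≤ (r : Int) := by exact_mod_cast hble
      exact h1.trans hshr.2.1
    · rintro ⟨b, hb, hbp, hbn, hbe, hxv⟩
      refine ⟨b, hb, hbp, ?_, hbe, hxv⟩
      apply hshr.2.2 b hb hbn
      rw [hl0, hslen] at *
      exact pvPi_max s (2*N) b hb
  -- B side: fold to filter, then clean up the predicate
  rw [pvFoldl_filter cc n (PySem.List.pyRange (PySem.Int.floordiv (n + 1) 2) n 1) []]
  rw [List.nil_append]
  have hq : PySem.Int.floordiv (n+1) 2 = (n+1)/2 :=
    PySem.Int.floordiv_eq_ediv_of_pos (by norm_num)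
  -- range facts for admitted k
  have hkfact : ∀ k : Int, PySem.Int.floordiv (n+1) 2 ≤ k → k < n →
      0 < 2*(n-k) ∧ (2*(n-k)).toNat ≤ N ∧ ((2*(n-k)).toNat : Int) = 2*(n-k) := by
    intro k h1 h2
    rw [hq] at h1
    constructor
    · omega
    constructor
    · omega
    · omega
  have hfc : (PySem.List.pyRange (PySem.Int.floordiv (n + 1) 2) n 1).filter
        (fun k => (PySem.List.pyRange 0 (2*(n-k)) 1).all
            (fun i => PySem.List.pyGetD cc i 0 == PySem.List.pyGetD cc (2*n - (2*(n-k)) + i) 0))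
      = (PySem.List.pyRange (PySem.Int.floordiv (n + 1) 2) n 1).filter
        (fun k => decide (pvP s s.length ((2*(n-k)).toNat))) := by
    apply List.filter_congr
    intro k hk
    rw [PySem.List.mem_pyRange_one] at hk
    obtain ⟨hb0, hbN, hbc⟩ := hkfact k hk.1 hk.2
    apply pvBool_eq_decide
    have hci := pvCond_iff cc N n (2*(n-k)) hNn h2cc hb0 (by omega)
    rw [← hsdef] at hci
    rw [hci]
  rw [hfc]
  -- final: both are sorted(same set); compare by perm + strict order
  apply PySem.List.sorted_eq_of_perm_of_pairwise_lt
  · -- permutation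
    rw [List.perm_ext_iff_of_nodup]
    · intro x
      simp only [List.mem_append, List.mem_singleton, List.mem_filter,
        PySem.List.mem_pyRange_one, decide_eq_true_eq]
      constructor
      · rintro (⟨⟨hk1, hk2⟩, hkP⟩ | rfl)
        · left
          obtain ⟨hb0, hbN, hbc⟩ := hkfact x hk1 hk2
          rw [hmemA x]
          refine ⟨(2*(n-x)).toNat, hkP, by omega, by omega, by omega, by omega⟩
        · right; rfl
      · rintro (hx | rfl)
        · left
          rw [hmemA x] at hx
          obtain ⟨b, hb, hbp, hbn, hbe, hxv⟩ := hx
          have hbdiv : ((b/2 : Nat) : Int) * 2 = (b : Int) := by omega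
          have hbb : (2*(n - x)).toNat = b := by omega
          refine ⟨⟨by rw [hq]; omega, by omega⟩, ?_⟩
          rw [hbb]
          exact hb
        · right; rfl
    · -- nodup of B list
      apply List.Pairwise.imp (fun {a b} (h : a < b) => ne_of_lt h)
      rw [List.pairwise_append]
      refine ⟨List.Pairwise.sublist List.filter_sublist (PySem.List.pairwise_lt_pyRange_one _ _), List.pairwise_singleton _ _, ?_⟩
      intro a ha y hy
      rw [List.mem_singleton] at hy
      subst hy
      have := List.mem_filter.mp ha |>.1
      rw [PySem.List.mem_pyRange_one] at this
      exact this.2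
    · -- nodup of A list
      apply List.Pairwise.imp (fun {a b} (h : a < b) => ne_of_lt h)
      rw [List.pairwise_append]
      refine ⟨hcol.2, List.pairwise_singleton _ _, ?_⟩
      intro a ha y hy
      rw [List.mem_singleton] at hy
      subst hy
      rw [hmemA a] at ha
      obtain ⟨b, hb, hbp, hbn, hbe, hxv⟩ := ha
      omega
  · -- B list strictly increasing
    rw [List.pairwise_append]
    refine ⟨List.Pairwise.sublist List.filter_sublist (PySem.List.pairwise_lt_pyRange_one _ _), List.pairwise_singleton _ _, ?_⟩
    intro a ha y hy
    rw [List.mem_singleton] at hy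
    subst hy
    have := List.mem_filter.mp ha |>.1
    rw [PySem.List.mem_pyRange_one] at this
    exact this.2
-- ===== VERDICT (by name: the statement is the Claim_ definition above) =====
theorem petya_spec : Claim_equal_petya := by
  intro n m c _ hpre
  unfold Spec_petya
  exact pvMain n m c hpre.1 hpre.2
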